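-- pv_equiv track=rewrite | github.com/wherby/code | contest/00000c490d177/c496/q3/t3 copy.py | minIncrease
-- ===== SOURCE A (Python) =====
-- from typing import List, Tuple, Optional
--
-- def minIncrease(nums: List[int]) -> int:
--     n = len(nums)
--     def get_cost(i):
--         return max(0, max(nums[i-1], nums[i+1]) + 1 - nums[i])
--     if n % 2 == 1:
--         ans = 0
--         for i in range(1, n, 2):
--             ans += get_cost(i)
--         return ans
--     m = n // 2
--     pre = [0] * (m)
--     suf = [0] * (m)
--
--     for i in range(1, m):
--         idx = 2 * i - 1
--         pre[i] = pre[i-1] + get_cost(idx)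
--
--     for i in range(m - 2, -1, -1):
--         idx = 2 * (i + 1)
--         suf[i] = suf[i+1] + get_cost(idx)
--
--     ans = 10**30
--     for i in range(m):
--         ans = min(ans, pre[i] + suf[i])
--     return ans
-- ===== SOURCE B (Python) =====
-- from typing import List, Tuple, Optional
--
-- def minIncrease(nums: List[int]) -> int:
--     n = len(nums)
--     def get_cost(i):
--         return max(0, max(nums[i-1], nums[i+1]) + 1 - nums[i])
--     if n % 2 == 1:
--         return sum(get_cost(i) for i in range(1, n, 2))
--     m = n // 2
--     INF = 10 ** 30
--     # two-state DP left to right over the m-1 interior pairs: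
--     # u = cost while still taking odd-indexed peaks (the switch lies ahead),
--     # v = best cost having already switched to even-indexed peaks (INF = not yet possible)
--     u, v = 0, INF
--     for j in range(1, m):
--         u, v = u + get_cost(2 * j - 1), min(u, v) + get_cost(2 * j)
--     return min(INF, u, v)
-- ===== Notes on version B (the rewrite author's own statement) =====
-- stated objective: alternative
-- what changed: Replaces A's split-point enumeration (pre[]/suf[] arrays plus a final min-scan over all splits) by a left-to-right two-state dynamic program over the interior pairs (state u = still on odd-indexed peaks, state v = already switched to even-indexed peaks), using O(1) extra space and no split-point arrays.
-- intended difference: On the empty list A returns its untouched sentinel 10**30 while B returns 0, the intended cost of fixing nothing. — e.g. on minIncrease([]): A returns 1000000000000000000000000000000, B returns 0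
import Mathlib
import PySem

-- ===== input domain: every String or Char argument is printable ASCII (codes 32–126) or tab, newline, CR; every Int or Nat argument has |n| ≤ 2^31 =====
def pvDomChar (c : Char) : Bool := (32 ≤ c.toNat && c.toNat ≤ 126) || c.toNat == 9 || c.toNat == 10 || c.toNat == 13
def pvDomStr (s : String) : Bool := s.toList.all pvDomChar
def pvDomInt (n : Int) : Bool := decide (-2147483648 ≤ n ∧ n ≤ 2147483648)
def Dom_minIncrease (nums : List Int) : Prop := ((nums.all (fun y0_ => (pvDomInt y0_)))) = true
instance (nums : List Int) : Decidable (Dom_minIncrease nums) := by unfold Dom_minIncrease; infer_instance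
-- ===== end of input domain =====

-- B replaces A's pre[]/suf[] split-point enumeration by a left-to-right two-state DP
-- (u = still on odd peaks, v = already switched to even peaks), O(1) extra space.

-- ===== PORT A =====
-- shared helper: Python's nums[i] for the in-range indices both programs use (exact there)
def pvAt (nums : List Int) (i : Int) : Int := (PySem.List.pyGet? nums i).getD 0

-- get_cost(i) = max(0, max(nums[i-1], nums[i+1]) + 1 - nums[i])  (identical in Source A and Source B)
def getCost (nums : List Int) (i : Int) : Int :=
  max 0 (max (pvAt nums (i - 1)) (pvAt nums (i + 1)) + 1 - pvAt nums i)

-- pre[i] from A's forward loop: pre[0] = 0, pre[i] = pre[i-1] + get_cost(2*i - 1)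
def preVal (nums : List Int) : Nat → Int
  | 0 => 0
  | i + 1 => preVal nums i + getCost nums (2 * ((i : Int) + 1) - 1)

-- A's backward loop, counted from the top: sufAux k = suf[m-1-k];
-- suf[m-1] = 0, suf[i] = suf[i+1] + get_cost(2*(i+1))
def sufAux (nums : List Int) (m : Nat) : Nat → Int
  | 0 => 0
  | k + 1 => sufAux nums m k + getCost nums (2 * ((m - 1 - k : Nat) : Int))

def minIncrease (nums : List Int) : Int :=
  let n : Int := nums.length
  if n % 2 == 1 then
    (PySem.List.pyRange 1 n 2).foldl (fun ans i => ans + getCost nums i) 0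
  else
    let m : Nat := nums.length / 2
    (List.range m).foldl
      (fun ans i => min ans (preVal nums i + sufAux nums m (m - 1 - i))) (10 ^ 30)

-- ===== PORT B =====
def minIncrease_alt (nums : List Int) : Int :=
  let n : Int := nums.length
  if n % 2 == 1 then
    ((PySem.List.pyRange 1 n 2).map (getCost nums)).sum
  else
    let m : Nat := nums.length / 2
    let inf : Int := 10 ^ 30
    let uv : Int × Int :=
      (List.range' 1 (m - 1)).foldl
        (fun (st : Int × Int) (j : Nat) =>
          (st.1 + getCost nums (2 * (j : Int) - 1),
           min st.1 st.2 + getCost nums (2 * (j : Int)))) (0, inf)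
    min inf (min uv.1 uv.2)

-- ===== PRECONDITION & SPEC =====
-- On the empty list A returns its untouched sentinel 10**30 while B returns 0,
-- the intended cost of fixing nothing.
def D_minIncrease (nums : List Int) : Prop := nums = []
instance (nums : List Int) : Decidable (D_minIncrease nums) := by unfold D_minIncrease; infer_instance

def Spec_minIncrease (nums : List Int) (out : Int) : Prop := ¬ D_minIncrease nums → out = minIncrease_alt nums
instance (nums : List Int) (out : Int) : Decidable (Spec_minIncrease nums out) := by unfold Spec_minIncrease; infer_instance

def pvDiffWitness_minIncrease : List Int := []
def pvDiffWitnessOut_minIncrease : Int × Int := (1000000000000000000000000000000, 0)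

-- ===== CLAIM (what is proved, stated in full; the proofs are below) =====
def Claim_unchanged_minIncrease : Prop := ∀ (nums : List Int), Dom_minIncrease nums → Spec_minIncrease nums (minIncrease nums)
def Claim_changed_minIncrease : Prop := Dom_minIncrease (pvDiffWitness_minIncrease) ∧ D_minIncrease (pvDiffWitness_minIncrease) ∧ minIncrease (pvDiffWitness_minIncrease) = pvDiffWitnessOut_minIncrease.1 ∧ minIncrease_alt (pvDiffWitness_minIncrease) = pvDiffWitnessOut_minIncrease.2 ∧ pvDiffWitnessOut_minIncrease.1 ≠ pvDiffWitnessOut_minIncrease.2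
def Claim_exact_minIncrease : Prop := ∀ (nums : List Int), Dom_minIncrease nums → D_minIncrease nums → minIncrease nums ≠ minIncrease_alt nums

-- ===== LEMMAS AND PROOFS =====

-- prefix of even-index costs: eSum k = get_cost(2) + … + get_cost(2k)
def eSum (nums : List Int) : Nat → Int
  | 0 => 0
  | i + 1 => eSum nums i + getCost nums (2 * (i : Int) + 2)

-- running minimum of (preVal i - eSum i) over i < k, starting from the sentinel
def mAux (nums : List Int) : Nat → Int
  | 0 => 10 ^ 30
  | k + 1 => min (mAux nums k) (preVal nums k - eSum nums k)

lemma getCost_nonneg (nums : List Int) (i : Int) : 0 ≤ getCost nums i :=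
  le_max_left _ _

lemma eSum_nonneg (nums : List Int) : ∀ k, 0 ≤ eSum nums k := by
  intro k
  induction k with
  | zero => simp [eSum]
  | succ k ih => have := getCost_nonneg nums (2 * (k : Int) + 2); simp [eSum]; omega

lemma sufAux_eSum (nums : List Int) (m : Nat) :
    ∀ k, k ≤ m - 1 → sufAux nums m k + eSum nums (m - 1 - k) = eSum nums (m - 1) := by
  intro k
  induction k with
  | zero => simp [sufAux]
  | succ k ih =>
      intro hk
      have hk' : k ≤ m - 1 := by omega
      have h1 : m - 1 - k = (m - 1 - (k + 1)) + 1 := by omega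
      have h3 : (2 * ((m - 1 - (k + 1) : Nat) : Int) + 2) = 2 * ((m - 1 - k : Nat) : Int) := by omega
      have := ih hk'
      rw [h1] at this
      simp only [eSum, h3] at this
      simp only [sufAux]
      omega

-- B's loop invariant: after the iterations j = 1..k the state is (preVal k, eSum k + mAux k)
lemma bloop (nums : List Int) :
    ∀ k, (List.range' 1 k).foldl
        (fun (st : Int × Int) (j : Nat) =>
          (st.1 + getCost nums (2 * (j : Int) - 1),
           min st.1 st.2 + getCost nums (2 * (j : Int)))) (0, (10 : Int) ^ 30)
      = (preVal nums k, eSum nums k + mAux nums k) := by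
  intro k
  induction k with
  | zero => simp [preVal, eSum, mAux]
  | succ k ih =>
      rw [List.range'_concat, List.foldl_append, ih]
      simp only [List.foldl_cons, List.foldl_nil]
      have h1 : (2 * ((1 + 1 * k : Nat) : Int) - 1) = 2 * ((k : Int) + 1) - 1 := by push_cast; ring
      have h2 : (2 * ((1 + 1 * k : Nat) : Int)) = 2 * (k : Int) + 2 := by push_cast; ring
      rw [h1, h2, Prod.mk.injEq]
      refine ⟨rfl, ?_⟩
      simp only [eSum, mAux]
      omega

-- A's min-scan, characterized through mAux: for k ≤ m-1 (m ≥ 1) the partial scan equals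
-- min(sentinel, eSum (m-1) + mAux k)
lemma aFold (nums : List Int) (m : Nat) (hm : 1 ≤ m) :
    ∀ k, k ≤ m - 1 →
      (List.range k).foldl
        (fun ans i => min ans (preVal nums i + sufAux nums m (m - 1 - i))) ((10 : Int) ^ 30)
      = min ((10 : Int) ^ 30) (eSum nums (m - 1) + mAux nums k) := by
  intro k
  induction k with
  | zero =>
      intro _
      have := eSum_nonneg nums (m - 1)
      simp only [List.range_zero, List.foldl_nil, mAux]
      omega
  | succ k ih =>
      intro hk
      have hk' : k ≤ m - 1 := by omega
      rw [List.range_succ, List.foldl_append, ih hk']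
      simp only [List.foldl_cons, List.foldl_nil, mAux]
      have hsuf : sufAux nums m (m - 1 - k) = eSum nums (m - 1) - eSum nums k := by
        have h := sufAux_eSum nums m (m - 1 - k) (by omega)
        have h2 : m - 1 - (m - 1 - k) = k := by omega
        rw [h2] at h; omega
      rw [hsuf]
      omega

-- the even branch agrees whenever m ≥ 1
lemma even_eq (nums : List Int) (m : Nat) (hm : 1 ≤ m) :
    (List.range m).foldl
      (fun ans i => min ans (preVal nums i + sufAux nums m (m - 1 - i))) ((10 : Int) ^ 30)
    = min ((10 : Int) ^ 30)
        (min (preVal nums (m - 1)) (eSum nums (m - 1) + mAux nums (m - 1))) := by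
  obtain ⟨m', rfl⟩ : ∃ m', m = m' + 1 := ⟨m - 1, by omega⟩
  rw [List.range_succ, List.foldl_append, aFold nums (m' + 1) hm m' (by omega)]
  simp only [List.foldl_cons, List.foldl_nil, Nat.add_sub_cancel]
  rw [Nat.sub_self]
  simp only [sufAux]
  omega

-- ===== VERDICT (by name: the statement is the Claim_ definition above) =====
theorem minIncrease_spec : Claim_unchanged_minIncrease := by
  intro nums _
  unfold Spec_minIncrease
  intro hD
  unfold D_minIncrease at hD
  unfold minIncrease minIncrease_alt
  by_cases hodd : ((nums.length : Int) % 2 == 1) = true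
  · simp only [hodd, if_pos]
    rw [PySem.List.foldl_add]
    simp
  · simp only [hodd, Bool.false_eq_true, if_neg, not_false_eq_true]
    have hne : (nums.length : Int) % 2 ≠ 1 := by
      intro h; exact hodd (by simp [h])
    have hlen : 1 ≤ nums.length := by
      cases nums with
      | nil => exact absurd rfl hD
      | cons a l => simp
    have hm : 1 ≤ nums.length / 2 := by omega
    rw [bloop, even_eq nums _ hm]

theorem minIncrease_changed : Claim_changed_minIncrease := by
  unfold Claim_changed_minIncrease; decide

theorem minIncrease_tight : Claim_exact_minIncrease := by
  intro nums _ hD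
  unfold D_minIncrease at hD
  subst hD
  decide
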